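-- pv_equiv track=rewrite | github.com/ModSquad2020/SD_Matt | pipeline/sequenceAnalysis.py | _makeUbiq
-- ===== SOURCE A (Python) =====
-- def _makeUbiq(alphaSet):
--     '''Return a list of UBIQITOUS sets given the sets of all possible substrings'''
--     basic = {'A', 'G', 'C', 'U'}
--     betaList = []
--
--     for searchNum, searchRNA in enumerate(alphaSet):
--         similar = searchRNA
--         for currentNum, otherRNA in enumerate(alphaSet):
--             if currentNum == searchNum:
--                 continue
--             similar = similar.intersection(otherRNA)
--
--         betaList.append(similar.difference(basic))
--
--     return betaList
-- ===== SOURCE B (Python) =====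
-- def _makeUbiq(alphaSet):
--     '''Return a list of UBIQITOUS sets given the sets of all possible substrings'''
--     basic = {'A', 'G', 'C', 'U'}
--     n = len(alphaSet)
--     counts = {}
--     for rna in alphaSet:
--         for sub in rna:
--             counts[sub] = counts.get(sub, 0) + 1
--     return [{sub for sub in rna if counts[sub] == n} - basic for rna in alphaSet]
-- ===== Notes on version B (the rewrite author's own statement) =====
-- stated objective: alternative
-- what changed: Instead of intersecting each set with all the others (n-1 set intersections per index), B makes one global counting pass and keeps, per set, the elements whose occurrence count equals n (i.e. members of every set); the pairwise-intersection loops disappear.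
import Mathlib
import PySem

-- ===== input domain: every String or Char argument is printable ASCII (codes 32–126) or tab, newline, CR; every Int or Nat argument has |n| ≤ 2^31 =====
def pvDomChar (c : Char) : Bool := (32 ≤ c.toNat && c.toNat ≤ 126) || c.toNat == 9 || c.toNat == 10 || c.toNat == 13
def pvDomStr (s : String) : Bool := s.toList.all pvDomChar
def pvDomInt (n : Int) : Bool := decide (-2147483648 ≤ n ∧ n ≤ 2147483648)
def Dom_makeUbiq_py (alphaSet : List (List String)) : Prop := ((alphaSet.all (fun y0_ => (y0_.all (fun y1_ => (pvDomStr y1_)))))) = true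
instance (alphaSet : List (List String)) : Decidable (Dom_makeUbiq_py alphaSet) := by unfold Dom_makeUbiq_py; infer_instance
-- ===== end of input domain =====

-- B replaces A's pairwise set intersections by one global occurrence count: an element is
-- ubiquitous iff it occurs in all n sets, so one counting pass suffices (objective: alternative).

-- ===== PORT A =====
def makeUbiq_py (alphaSet : List (List String)) : List (List String) :=
  let basic : PySem.Set String := PySem.Set.ofList ["A", "G", "C", "U"]
  (PySem.List.enumerate alphaSet).foldl
    (fun betaList p =>
      let similar :=
        (PySem.List.enumerate alphaSet).foldl
          (fun similar q =>
            if q.1 == p.1 then similar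
            else PySem.Set.inter similar (PySem.Set.ofList q.2))
          (PySem.Set.ofList p.2)
      betaList ++ [PySem.Set.diff similar basic])
    []

-- ===== PORT B =====
def makeUbiq_py_alt (alphaSet : List (List String)) : List (List String) :=
  let basic : PySem.Set String := PySem.Set.ofList ["A", "G", "C", "U"]
  let n : Int := alphaSet.length
  let counts : PySem.Dict String Int :=
    (alphaSet.flatMap (fun rna => PySem.Set.ofList rna)).foldl
      (fun d sub => d.modify sub 0 (· + 1)) PySem.Dict.empty
  alphaSet.map (fun rna =>
    PySem.Set.diff ((PySem.Set.ofList rna).filter (fun sub => counts.getD sub 0 == n)) basic)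

-- ===== PRECONDITION & SPEC =====
def Spec_makeUbiq_py (alphaSet : List (List String)) (out : List (List String)) : Prop := out = makeUbiq_py_alt alphaSet
instance (alphaSet : List (List String)) (out : List (List String)) : Decidable (Spec_makeUbiq_py alphaSet out) := by unfold Spec_makeUbiq_py; infer_instance

-- ===== CLAIM (what is proved, stated in full; the proofs are below) =====
def Claim_equal_makeUbiq_py : Prop := ∀ (alphaSet : List (List String)), Dom_makeUbiq_py alphaSet → Spec_makeUbiq_py alphaSet (makeUbiq_py alphaSet)

-- ===== LEMMAS AND PROOFS =====

-- the outer append-loop is a map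
theorem foldl_append_map {α β : Type} (l : List α) (f : α → β) (acc : List β) :
    l.foldl (fun b p => b ++ [f p]) acc = acc ++ l.map f := by
  induction l generalizing acc with
  | nil => simp
  | cons x xs ih => simp [List.foldl, ih]

-- the inner intersection loop is a filter of the start set
theorem foldl_inter_filter (i : Int) (l : List (Int × List String)) (start : List String) :
    l.foldl (fun sim q => if q.1 == i then sim
               else PySem.Set.inter sim (PySem.Set.ofList q.2)) start
    = start.filter (fun x => l.all (fun q => q.1 == i || PySem.Set.contains (PySem.Set.ofList q.2) x)) := by
  induction l generalizing start with
  | nil => simp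
  | cons q l ih =>
    simp only [List.foldl, List.all_cons]
    by_cases h : q.1 == i
    · rw [if_pos h, ih]
      apply List.filter_congr
      intro x _
      simp [h]
    · rw [if_neg h, ih]
      have hq : PySem.Set.inter start (PySem.Set.ofList q.2)
          = start.filter (fun x => PySem.Set.contains (PySem.Set.ofList q.2) x) := rfl
      rw [hq, List.filter_filter]
      apply List.filter_congr
      intro x _
      simp [h]
      exact Bool.and_comm _ _

-- the counting loop counts, per element, the sets that contain it
theorem count_flatMap_ofList (L : List (List String)) (x : String) :
    ((L.flatMap (fun s => PySem.Set.ofList s)).count x : Int)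
    = ((L.filter (fun s => PySem.Set.contains (PySem.Set.ofList s) x)).length : Int) := by
  induction L with
  | nil => simp
  | cons s L ih =>
    by_cases hm : x ∈ s
    · have h1 : (PySem.Set.ofList s).count x = 1 :=
        List.count_eq_one_of_mem (PySem.Set.nodup_ofList s)
          (by simp [PySem.Set.mem_ofList, hm])
      simp only [List.flatMap_cons, List.count_append, List.filter_cons]
      simp [hm, ih]
      omega
    · have h0 : (PySem.Set.ofList s).count x = 0 :=
        List.count_eq_zero_of_not_mem (by simp [PySem.Set.mem_ofList, hm])
      simp only [List.flatMap_cons, List.count_append, List.filter_cons]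
      simp [hm, h0, ih]

-- membership in enumerate
theorem mem_enum (L : List (List String)) (q : Int × List String) :
    q ∈ PySem.List.enumerate L ↔ ∃ (j : Nat) (_ : j < L.length), q = ((j : Int), L[j]) := by
  rw [List.mem_iff_getElem]
  constructor
  · rintro ⟨j, hj, rfl⟩
    have hjL : j < L.length := by simpa [PySem.List.length_enumerate] using hj
    exact ⟨j, hjL, by simp [PySem.List.getElem_enumerate]⟩
  · rintro ⟨j, hjL, rfl⟩
    exact ⟨j, by simpa [PySem.List.length_enumerate] using hjL,
      by simp [PySem.List.getElem_enumerate]⟩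

-- ===== VERDICT (by name: the statement is the Claim_ definition above) =====
theorem makeUbiq_py_spec : Claim_equal_makeUbiq_py := by
  intro L _
  unfold Spec_makeUbiq_py makeUbiq_py makeUbiq_py_alt
  rw [foldl_append_map]
  simp only [List.nil_append]
  apply List.ext_getElem
  · simp [PySem.List.length_enumerate]
  · intro k hk hk'
    have hkL : k < L.length := by simpa using hk'
    simp only [List.getElem_map, PySem.List.getElem_enumerate]
    rw [foldl_inter_filter]
    congr 1
    apply List.filter_congr
    intro x hx
    have hxk : x ∈ L[k] := by
      simpa [PySem.Set.mem_ofList] using (hx : x ∈ PySem.Set.ofList L[k])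
    have hcount : ((L.flatMap (fun rna => PySem.Set.ofList rna)).foldl
        (fun d sub => d.modify sub 0 (· + 1)) PySem.Dict.empty).getD x 0
        = ((L.filter (fun s => PySem.Set.contains (PySem.Set.ofList s) x)).length : Int) := by
      rw [PySem.Dict.getD_foldl_modify_add_one]
      have h0 : (PySem.Dict.empty : PySem.Dict String Int).getD x 0 = 0 := rfl
      rw [h0, zero_add]
      exact count_flatMap_ofList L x
    rw [hcount, Bool.eq_iff_iff]
    simp only [List.all_eq_true, Bool.or_eq_true, beq_iff_eq,
      PySem.Set.contains_iff, PySem.Set.mem_ofList, Nat.cast_inj]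
    constructor
    · intro hA
      rw [List.length_filter_eq_length_iff]
      intro s hs
      rcases List.mem_iff_getElem.mp hs with ⟨j, hj, rfl⟩
      simp only [PySem.Set.contains_iff, PySem.Set.mem_ofList]
      by_cases hji : j = k
      · subst hji; exact hxk
      · rcases hA ((j : Int), L[j]) ((mem_enum L _).mpr ⟨j, hj, rfl⟩) with h1 | h2
        · exfalso
          apply hji
          have h1' : (j : Int) = ((0 + k : Nat) : Int) := h1
          omega
        · exact h2
    · intro hB q hq
      rcases (mem_enum L q).mp hq with ⟨j, hj, rfl⟩
      right
      have := List.length_filter_eq_length_iff.mp hB L[j] (List.getElem_mem hj)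
      simpa [PySem.Set.contains_iff, PySem.Set.mem_ofList] using this
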